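-- pv_equiv track=rewrite | github.com/matta-research-group/QCflow | fragments.py | make_trimer_dic_from_2_dic
-- ===== SOURCE A (Python) =====
-- import itertools
--
-- def make_trimer_smiles(a, b):
--     """
--     Combines two fragments to make a trimer with both the aba and bab
--     configuration produced
--
--     a : SMILE string of a fragment with attachment points
--
--     b : SMILE string of a fragment with attachment points
--     """
--     aba = a.format('', '8') + '.' + b.format('8', '9') + '.' + a.format('9', '')
--     bab = b.format('', '8') + '.' + a.format('8', '9') + '.' + b.format('9', '')
--     return aba, bab
--
-- def make_trimer_dic_from_2_dic(frag_dic_1,frag_dic_2):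
--
--     """
--     When provided 2 fragment dictionaries, generates SMILES for all possible
--     trimers (ABA & BAB) and returns dictionary of trimers.
--
--     Where the key is the name of the trimer, if fragment 0 is combined with
--     fragment 1 then the name is 0_1_0 & 1_0_1.
--
--     The value is the SMILE string of the trimer
--
--     fragment_dic : The dictionary of all the fragments
--     """
--
--     mol_smiles = [make_trimer_smiles(v1, v2)
--                     for v1, v2 in itertools.product(list(frag_dic_1.values()),list(frag_dic_2.values()))]
--     #Makes all the possible trimers aba and bab
--     k1k2k1 = []
--     k2k1k2 = []
--     for seperate in mol_smiles:
--         aba = seperate[0]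
--         bab = seperate[1]
--
--         k1k2k1.append(aba)
--         k2k1k2.append(bab)
--     #Makes the two lists of aba and bab
--
--     aba = [(f'{k1}_{k2}_{k1}')
--                     for k1, k2 in itertools.product(frag_dic_1.keys(),frag_dic_2.keys())]
--     #combinations of keys for aba
--     bab = [(f'{k2}_{k1}_{k2}')
--                     for k1, k2 in itertools.product(frag_dic_1.keys(),frag_dic_2.keys())]
--     #combinations of keys for bab
--     aba_dic = { k : v for k, v in zip(aba, k1k2k1) }
--     #Makes dictionary of all the aba keys with the aba trimers
--     bab_dic = { k : v for k, v in zip(bab, k2k1k2) }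
--     #Makes dicitionary of all the bab keys with the bab trimers
--     trimer_dic = aba_dic | bab_dic
--     #Combines these two dictionaries together
--     return trimer_dic
-- ===== SOURCE B (Python) =====
-- def make_trimer_smiles(a, b):
--     aba = a.format('', '8') + '.' + b.format('8', '9') + '.' + a.format('9', '')
--     bab = b.format('', '8') + '.' + a.format('8', '9') + '.' + b.format('9', '')
--     return aba, bab
--
-- def make_trimer_dic_from_2_dic(frag_dic_1, frag_dic_2):
--     """Two explicit nested loops over the items (no itertools, no intermediate
--     lists): each iteration builds both trimers and writes them straight into the
--     two dictionaries, which are merged at the end (bab wins on collisions, as in A)."""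
--     aba_dic = {}
--     bab_dic = {}
--     for k1, v1 in frag_dic_1.items():
--         for k2, v2 in frag_dic_2.items():
--             aba, bab = make_trimer_smiles(v1, v2)
--             aba_dic[f'{k1}_{k2}_{k1}'] = aba
--             bab_dic[f'{k2}_{k1}_{k2}'] = bab
--     return aba_dic | bab_dic
-- ===== Notes on version B (the rewrite author's own statement) =====
-- stated objective: simpler
-- what changed: Two explicit nested loops over the items build both dictionaries directly in one fused pass, replacing A's intermediate mol_smiles list, the tuple-splitting loop, the two key-list comprehensions, the two zip-based dict comprehensions and the itertools.product machinery.
import Mathlib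
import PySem

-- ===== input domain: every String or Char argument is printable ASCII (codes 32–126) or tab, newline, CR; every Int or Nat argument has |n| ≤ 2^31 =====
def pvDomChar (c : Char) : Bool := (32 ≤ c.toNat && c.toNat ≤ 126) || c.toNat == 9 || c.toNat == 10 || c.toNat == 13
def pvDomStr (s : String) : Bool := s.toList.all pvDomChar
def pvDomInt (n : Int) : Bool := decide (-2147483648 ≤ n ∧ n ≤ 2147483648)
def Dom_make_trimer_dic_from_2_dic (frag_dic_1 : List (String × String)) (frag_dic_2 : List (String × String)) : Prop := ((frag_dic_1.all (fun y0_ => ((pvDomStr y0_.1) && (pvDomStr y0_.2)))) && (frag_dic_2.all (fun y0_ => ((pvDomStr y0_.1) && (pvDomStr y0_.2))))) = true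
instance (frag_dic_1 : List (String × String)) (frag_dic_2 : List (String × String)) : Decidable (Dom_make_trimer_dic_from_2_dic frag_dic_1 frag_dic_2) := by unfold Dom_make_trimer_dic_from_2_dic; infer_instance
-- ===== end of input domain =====

-- B replaces A's five staged passes (list of smiles tuples, tuple-splitting loop, two key
-- comprehensions, two zip-based dict comprehensions over itertools.product) by two explicit
-- nested loops that write both dictionaries directly, merged at the end exactly as A merges them.

-- ===== PORT A =====
-- helpers shared by the two ports (both Pythons contain the same `make_trimer_smiles` code)

-- itertools.product(xs, ys) (2-ary, left-major order)
def pyProduct {α β : Type} (xs : List α) (ys : List β) : List (α × β) :=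
  xs.flatMap (fun x => ys.map (fun y => (x, y)))

-- s.format(a0, a1) for SIMPLE format strings: literal text, '{{', '}}' escapes and bare '{}'
-- auto-numbered fields — exact there (Pre_ admits exactly such values with at most 2 fields;
-- on other brace uses Python's format raises or substitutes and those inputs are outside Pre_).
def fmtGo : List Char → List String → List Char
  | [], _ => []
  | '{' :: '{' :: r, args => '{' :: fmtGo r args
  | '}' :: '}' :: r, args => '}' :: fmtGo r args
  | '{' :: '}' :: r, a :: as => a.toList ++ fmtGo r as
  | '{' :: '}' :: r, [] => fmtGo r []   -- unreachable inside Pre_ (Python raises IndexError)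
  | c :: r, args => c :: fmtGo r args

-- make_trimer_smiles(a, b): (aba, bab) built by '+' concatenation with '.' separators
def makeTrimerSmiles (a b : String) : String × String :=
  (String.ofList (fmtGo a.toList ["", "8"] ++ '.' :: fmtGo b.toList ["8", "9"] ++ '.' :: fmtGo a.toList ["9", ""]),
   String.ofList (fmtGo b.toList ["", "8"] ++ '.' :: fmtGo a.toList ["8", "9"] ++ '.' :: fmtGo b.toList ["9", ""]))

-- f'{k1}_{k2}_{k3}'
def joinU (k1 k2 k3 : String) : String :=
  String.ofList (k1.toList ++ '_' :: k2.toList ++ '_' :: k3.toList)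

def make_trimer_dic_from_2_dic (frag_dic_1 : List (String × String)) (frag_dic_2 : List (String × String)) : List (String × String) :=
  let d1 : PySem.Dict String String := PySem.Dict.ofList frag_dic_1
  let d2 : PySem.Dict String String := PySem.Dict.ofList frag_dic_2
  let mol_smiles := (pyProduct d1.values d2.values).map (fun p => makeTrimerSmiles p.1 p.2)
  -- for seperate in mol_smiles: k1k2k1.append(aba); k2k1k2.append(bab)
  let ks := mol_smiles.foldl (fun (acc : List String × List String) sep => (acc.1 ++ [sep.1], acc.2 ++ [sep.2])) ([], [])
  let aba := (pyProduct d1.keys d2.keys).map (fun p => joinU p.1 p.2 p.1)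
  let bab := (pyProduct d1.keys d2.keys).map (fun p => joinU p.2 p.1 p.2)
  let aba_dic := (aba.zip ks.1).foldl (fun (d : PySem.Dict String String) kv => d.insert kv.1 kv.2) PySem.Dict.empty
  let bab_dic := (bab.zip ks.2).foldl (fun (d : PySem.Dict String String) kv => d.insert kv.1 kv.2) PySem.Dict.empty
  -- trimer_dic = aba_dic | bab_dic
  (aba_dic.update bab_dic.items).items

-- ===== PORT B =====
-- inner loop: 'for k2, v2 in frag_dic_2.items(): …' for a fixed (k1, v1)
def altInner (k1 v1 : String) :
    List (String × String) → PySem.Dict String String × PySem.Dict String String →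
    PySem.Dict String String × PySem.Dict String String
  | [], acc => acc
  | (k2, v2) :: rest, acc =>
      let st := makeTrimerSmiles v1 v2
      altInner k1 v1 rest (acc.1.insert (joinU k1 k2 k1) st.1, acc.2.insert (joinU k2 k1 k2) st.2)

-- outer loop: 'for k1, v1 in frag_dic_1.items(): …'
def altOuter (items2 : List (String × String)) :
    List (String × String) → PySem.Dict String String × PySem.Dict String String →
    PySem.Dict String String × PySem.Dict String String
  | [], acc => acc
  | (k1, v1) :: rest, acc => altOuter items2 rest (altInner k1 v1 items2 acc)

def make_trimer_dic_from_2_dic_alt (frag_dic_1 : List (String × String)) (frag_dic_2 : List (String × String)) : List (String × String) :=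
  let d1 : PySem.Dict String String := PySem.Dict.ofList frag_dic_1
  let d2 : PySem.Dict String String := PySem.Dict.ofList frag_dic_2
  let p := altOuter d2.items d1.items (PySem.Dict.empty, PySem.Dict.empty)
  (p.1.update p.2.items).items

-- ===== PRECONDITION & SPEC =====
-- Brace-simple format strings: only '{{' / '}}' escapes and bare '{}' fields, at most two of them.
def braceSimple : List Char → Nat → Bool
  | [], used => used ≤ 2
  | '{' :: '{' :: r, used => braceSimple r used
  | '}' :: '}' :: r, used => braceSimple r used
  | '{' :: '}' :: r, used => braceSimple r (used + 1)
  | '{' :: _, _ => false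
  | '}' :: _, _ => false
  | _ :: r, used => braceSimple r used

-- Pre_ excludes fragment-value strings with any other use of braces: on those str.format either
-- raises (stray brace, more than two '{}' fields) or substitutes via format-mini-language fields
-- such as '{0}' that the ports do not model (A and B still agree there — see cites).
def Pre_make_trimer_dic_from_2_dic (frag_dic_1 : List (String × String)) (frag_dic_2 : List (String × String)) : Prop :=
  (∀ p ∈ frag_dic_1, braceSimple p.2.toList 0 = true) ∧ (∀ p ∈ frag_dic_2, braceSimple p.2.toList 0 = true)
instance (frag_dic_1 : List (String × String)) (frag_dic_2 : List (String × String)) : Decidable (Pre_make_trimer_dic_from_2_dic frag_dic_1 frag_dic_2) := by unfold Pre_make_trimer_dic_from_2_dic; infer_instance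

def pvWitness_make_trimer_dic_from_2_dic : (List (String × String)) × (List (String × String)) :=
  ([("0", "{}C{}"), ("1", "{}N{}")], [("2", "{}O{}")])

def Spec_make_trimer_dic_from_2_dic (frag_dic_1 : List (String × String)) (frag_dic_2 : List (String × String)) (out : List (String × String)) : Prop := out = make_trimer_dic_from_2_dic_alt frag_dic_1 frag_dic_2
instance (frag_dic_1 : List (String × String)) (frag_dic_2 : List (String × String)) (out : List (String × String)) : Decidable (Spec_make_trimer_dic_from_2_dic frag_dic_1 frag_dic_2 out) := by unfold Spec_make_trimer_dic_from_2_dic; infer_instance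

-- ===== CLAIM (what is proved, stated in full; the proofs are below) =====
def Claim_equal_make_trimer_dic_from_2_dic : Prop := ∀ (frag_dic_1 : List (String × String)) (frag_dic_2 : List (String × String)), Dom_make_trimer_dic_from_2_dic frag_dic_1 frag_dic_2 → Pre_make_trimer_dic_from_2_dic frag_dic_1 frag_dic_2 → Spec_make_trimer_dic_from_2_dic frag_dic_1 frag_dic_2 (make_trimer_dic_from_2_dic frag_dic_1 frag_dic_2)

-- ===== LEMMAS AND PROOFS =====

-- product of two mapped lists is the mapped product (specific to pyProduct, defined here)
theorem pyProduct_map {α β α' β' : Type} (f : α → α') (g : β → β') (xs : List α) (ys : List β) :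
    pyProduct (xs.map f) (ys.map g) = (pyProduct xs ys).map (fun p => (f p.1, g p.2)) := by
  simp [pyProduct, List.flatMap_map, List.map_flatMap, List.map_map]
  rfl

-- the step both directions fold with
def pairStep (acc : PySem.Dict String String × PySem.Dict String String)
    (it : (String × String) × (String × String)) :
    PySem.Dict String String × PySem.Dict String String :=
  (acc.1.insert (joinU it.1.1 it.2.1 it.1.1) (makeTrimerSmiles it.1.2 it.2.2).1,
   acc.2.insert (joinU it.2.1 it.1.1 it.2.1) (makeTrimerSmiles it.1.2 it.2.2).2)

theorem altInner_eq_foldl (k1 v1 : String) (ys : List (String × String))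
    (acc : PySem.Dict String String × PySem.Dict String String) :
    altInner k1 v1 ys acc = (ys.map (fun y => ((k1, v1), y))).foldl pairStep acc := by
  induction ys generalizing acc with
  | nil => rfl
  | cons y rest ih => cases y; simp [altInner, ih, pairStep]

theorem altOuter_eq_foldl (ys xs : List (String × String))
    (acc : PySem.Dict String String × PySem.Dict String String) :
    altOuter ys xs acc = (pyProduct xs ys).foldl pairStep acc := by
  induction xs generalizing acc with
  | nil => rfl
  | cons x rest ih =>
      cases x
      simp [altOuter, ih, pyProduct, List.foldl_append, altInner_eq_foldl]

-- ===== VERDICT (by name: the statement is the Claim_ definition above) =====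
theorem make_trimer_dic_from_2_dic_spec : Claim_equal_make_trimer_dic_from_2_dic := by
  intro l1 l2 _ _
  unfold Spec_make_trimer_dic_from_2_dic make_trimer_dic_from_2_dic make_trimer_dic_from_2_dic_alt
  simp only [PySem.Dict.values, PySem.Dict.keys]
  rw [PySem.List.foldl_prod_mk
        (fun (s : List String) (e : String × String) => s ++ [e.1])
        (fun (s : List String) (e : String × String) => s ++ [e.2])]
  rw [altOuter_eq_foldl]
  unfold pairStep
  rw [PySem.List.foldl_prod_mk
        (fun (d : PySem.Dict String String) (it : (String × String) × (String × String)) =>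
          d.insert (joinU it.1.1 it.2.1 it.1.1) (makeTrimerSmiles it.1.2 it.2.2).1)
        (fun (d : PySem.Dict String String) (it : (String × String) × (String × String)) =>
          d.insert (joinU it.2.1 it.1.1 it.2.1) (makeTrimerSmiles it.1.2 it.2.2).2)]
  simp only [PySem.List.foldl_append_singleton_eq_map, List.nil_append,
    pyProduct_map, List.map_map, List.zip_map', List.foldl_map, Function.comp]
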